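-- pv_equiv track=rewrite | github.com/reynaldocv/leetcode | 2000 - 2999/2223. [Hard] Sum of Scores of Built Strings.py | sumScores
-- ===== SOURCE A (Python) =====
-- def sumScores(s: str) -> int:
--     def helper(s):
--         dp = [0 for _ in range(n)]
--         left, right = 0, 0
--
--         for i in range (1, n):
--             if i > right:
--                 left = right = i
--
--                 while right < n and s[right - left] == s[right]:
--                     right += 1
--                 right -= 1
--
--                 dp[i] = right - left + 1
--             else:
--                 val = i - left
--
--                 if dp[val] + i <= right:
--                     dp[i] = dp[val]
--
--                 else:
--                     left = i
--
--                     while right < n and s[right - left] == s[right]: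
--                         right += 1
--                     right -= 1
--
--                     dp[i] = right - left + 1
--
--         return sum(dp)
--
--     n = len(s)
--
--     return helper(s) + n
-- ===== SOURCE B (Python) =====
-- def sumScores(s: str) -> int:
--     n = len(s)
--     total = 0
--     for i in range(n):
--         j = 0
--         while i + j < n and s[j] == s[i + j]:
--             j += 1
--         total += j
--     return total
-- ===== Notes on version B (the rewrite author's own statement) =====
-- stated objective: simpler
-- what changed: Replaced the Z-algorithm (left/right window with dp-value reuse) by the direct definition: for each i, a plain scan counting the longest common prefix of s and s[i:], summed; no window or dp array is kept.
import Mathlib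
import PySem

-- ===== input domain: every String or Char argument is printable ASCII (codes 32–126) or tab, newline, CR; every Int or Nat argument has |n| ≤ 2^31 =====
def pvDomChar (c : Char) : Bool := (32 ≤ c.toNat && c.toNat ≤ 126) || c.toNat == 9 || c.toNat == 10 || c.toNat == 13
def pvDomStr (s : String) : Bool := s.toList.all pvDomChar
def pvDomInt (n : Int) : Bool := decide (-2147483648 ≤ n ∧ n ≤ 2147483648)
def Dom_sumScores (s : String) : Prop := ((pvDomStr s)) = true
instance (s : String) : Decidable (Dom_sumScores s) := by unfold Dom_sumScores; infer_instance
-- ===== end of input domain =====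

-- B replaces A's O(n) Z-algorithm (left/right window + dp reuse) by the direct
-- definition: for each i, scan the longest common prefix of s and s[i:]; simpler
-- (no window state), not faster.

-- ===== PORT A =====
-- A's inner `while right < n and s[right-left] == s[right]: right += 1`
-- (indices are always in range there, so Option-equality of `[·]?` is exact).
def extA (cs : List Char) (left right : Nat) : Nat :=
  if h : right < cs.length ∧ cs[right - left]? = cs[right]? then extA cs left (right + 1)
  else right
termination_by cs.length - right
decreasing_by omega

-- one iteration of A's `for i in range(1, n)` loop on the state (dp, left, right).
-- Python's `dp[i] = right - left + 1` always has right + 1 ≥ left, so it is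
-- ported as `right + 1 - left` (Nat subtraction would truncate the other form);
-- Python's `right -= 1` after the while is the `- 1` on the extA result.
def stepA (cs : List Char) (st : List Nat × Nat × Nat) (i : Nat) : List Nat × Nat × Nat :=
  let dp := st.1
  let left := st.2.1
  let right := st.2.2
  if right < i then  -- Python: `if i > right`
    let right' := extA cs i i - 1
    (dp.set i (right' + 1 - i), i, right')
  else
    let val := i - left
    if dp.getD val 0 + i ≤ right then
      (dp.set i (dp.getD val 0), left, right)
    else
      let right' := extA cs i right - 1
      (dp.set i (right' + 1 - i), i, right')

def sumScores (s : String) : Int :=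
  let cs := s.toList
  let n := cs.length
  let res := (List.range' 1 (n - 1)).foldl (stepA cs) ((List.replicate n 0 : List Nat), 0, 0)
  (res.1.sum : Int) + (n : Int)

-- ===== PORT B =====
-- B's inner `while i + j < n and s[j] == s[i+j]: j += 1`.
def scanB (cs : List Char) (i j : Nat) : Nat :=
  if h : i + j < cs.length ∧ cs[j]? = cs[i + j]? then scanB cs i (j + 1)
  else j
termination_by cs.length - (i + j)
decreasing_by omega

def sumScores_alt (s : String) : Int :=
  let cs := s.toList
  (((List.range cs.length).foldl (fun t i => t + scanB cs i 0) 0 : Nat) : Int)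

-- ===== PRECONDITION & SPEC =====
def Spec_sumScores (s : String) (out : Int) : Prop := out = sumScores_alt s
instance (s : String) (out : Int) : Decidable (Spec_sumScores s out) := by unfold Spec_sumScores; infer_instance

-- ===== CLAIM (what is proved, stated in full; the proofs are below) =====
def Claim_equal_sumScores : Prop := ∀ (s : String), Dom_sumScores s → Spec_sumScores s (sumScores s)

-- ===== LEMMAS AND PROOFS =====

-- length of the longest common prefix of two char lists (the mathematical spec
-- both ports are reduced to; Z value of cs at i is `lcpL cs (cs.drop i)`).
def lcpL : List Char → List Char → Nat
  | x :: xs, y :: ys => if x = y then lcpL xs ys + 1 else 0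
  | _, _ => 0

theorem lcpL_le : ∀ (a b : List Char), lcpL a b ≤ b.length := by
  intro a
  induction a with
  | nil => intro b; cases b <;> simp [lcpL]
  | cons x xs ih =>
    intro b
    cases b with
    | nil => simp [lcpL]
    | cons y ys =>
      by_cases h : x = y <;> simp [lcpL, h]
      exact ih ys

theorem lcpL_refl : ∀ (a : List Char), lcpL a a = a.length := by
  intro a; induction a with
  | nil => simp [lcpL]
  | cons x xs ih => simp [lcpL, ih]

theorem lcpL_match : ∀ (a b : List Char) (k : Nat), k < lcpL a b → a[k]? = b[k]? := by
  intro a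
  induction a with
  | nil => intro b k h; cases b <;> simp [lcpL] at h
  | cons x xs ih =>
    intro b k h
    cases b with
    | nil => simp [lcpL] at h
    | cons y ys =>
      by_cases hxy : x = y
      · simp only [lcpL, if_pos hxy] at h
        cases k with
        | zero => simp [hxy]
        | succ k' => simpa using ih ys k' (by omega)
      · simp [lcpL, hxy] at h

theorem lcpL_stop : ∀ (a b : List Char), lcpL a b < b.length → a[lcpL a b]? ≠ b[lcpL a b]? := by
  intro a
  induction a with
  | nil =>
    intro b h
    cases b with
    | nil => simp at h
    | cons y ys => simp [lcpL]
  | cons x xs ih =>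
    intro b h
    cases b with
    | nil => simp at h
    | cons y ys =>
      by_cases hxy : x = y
      · simp only [lcpL, if_pos hxy, List.length_cons] at h ⊢
        simpa using ih ys (by omega)
      · simp [lcpL, hxy]

theorem lcpL_eq_of (a b : List Char) (m : Nat) (hm : m ≤ b.length)
    (hmatch : ∀ k < m, a[k]? = b[k]?)
    (hstop : m = b.length ∨ a[m]? ≠ b[m]?) : lcpL a b = m := by
  rcases Nat.lt_trichotomy (lcpL a b) m with h | h | h
  · exact absurd (hmatch _ h) (lcpL_stop a b (by omega))
  · exact h
  · have h1 := lcpL_match a b m h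
    rcases hstop with h2 | h2
    · have := lcpL_le a b; omega
    · exact absurd h1 h2

-- B's scan computes the lcp of cs and cs.drop i.
theorem scanB_eq : ∀ (fuel : Nat) (cs : List Char) (i j : Nat),
    cs.length - (i + j) ≤ fuel → i + j ≤ cs.length →
    (∀ k < j, cs[k]? = cs[i + k]?) →
    scanB cs i j = lcpL cs (cs.drop i) := by
  intro fuel
  induction fuel with
  | zero =>
    intro cs i j hfuel hij hpre
    rw [scanB]
    rw [dif_neg (by omega)]
    refine (lcpL_eq_of cs (cs.drop i) j (by simp; omega) ?_ ?_).symm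
    · intro k hk; rw [List.getElem?_drop]; exact hpre k hk
    · left; simp; omega
  | succ fuel ih =>
    intro cs i j hfuel hij hpre
    rw [scanB]
    by_cases hg : i + j < cs.length ∧ cs[j]? = cs[i + j]?
    · rw [dif_pos hg]
      refine ih cs i (j + 1) (by omega) (by omega) ?_
      intro k hk
      rcases Nat.lt_or_ge k j with h | h
      · exact hpre k h
      · have : k = j := by omega
        subst this; exact hg.2
    · rw [dif_neg hg]
      refine (lcpL_eq_of cs (cs.drop i) j (by simp; omega) ?_ ?_).symm
      · intro k hk; rw [List.getElem?_drop]; exact hpre k hk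
      · by_cases hn : i + j < cs.length
        · right
          rw [List.getElem?_drop]
          intro hc
          exact hg ⟨hn, hc⟩
        · left; simp; omega

-- A's extension loop, started at r with everything before r already matching,
-- stops exactly at left + (lcp of cs and cs.drop left).
theorem extA_eq : ∀ (fuel : Nat) (cs : List Char) (left r : Nat),
    cs.length - r ≤ fuel → left ≤ r → r ≤ cs.length →
    (∀ k < r - left, cs[k]? = cs[left + k]?) →
    extA cs left r = left + lcpL cs (cs.drop left) := by
  intro fuel
  induction fuel with
  | zero =>
    intro cs left r hfuel hlr hr hpre
    rw [extA, dif_neg (by omega)]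
    have : lcpL cs (cs.drop left) = r - left := by
      refine lcpL_eq_of cs (cs.drop left) (r - left) (by simp; omega) ?_ ?_
      · intro k hk; rw [List.getElem?_drop]; exact hpre k hk
      · left; simp; omega
    omega
  | succ fuel ih =>
    intro cs left r hfuel hlr hr hpre
    rw [extA]
    by_cases hg : r < cs.length ∧ cs[r - left]? = cs[r]?
    · rw [dif_pos hg]
      refine ih cs left (r + 1) (by omega) (by omega) (by omega) ?_
      intro k hk
      rcases Nat.lt_or_ge k (r - left) with h | h
      · exact hpre k h
      · have hk' : k = r - left := by omega
        subst hk'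
        have : left + (r - left) = r := by omega
        rw [this]; exact hg.2
    · rw [dif_neg hg]
      have : lcpL cs (cs.drop left) = r - left := by
        refine lcpL_eq_of cs (cs.drop left) (r - left) (by simp; omega) ?_ ?_
        · intro k hk; rw [List.getElem?_drop]; exact hpre k hk
        · by_cases hn : r < cs.length
          · right
            rw [List.getElem?_drop]
            have : left + (r - left) = r := by omega
            rw [this]
            intro hc
            exact hg ⟨hn, hc⟩
          · left; simp; omega
      omega

-- loop invariant of A's for-loop: before iteration i, dp holds the Z values of
-- all processed indices and (left, right) is a matching window ending before n.
def InvA (cs : List Char) (i : Nat) (st : List Nat × Nat × Nat) : Prop :=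
  st.1.length = cs.length ∧
  st.1.getD 0 0 = 0 ∧
  (∀ k, 1 ≤ k → k < i → st.1.getD k 0 = lcpL cs (cs.drop k)) ∧
  st.2.1 < i ∧
  st.2.2 < cs.length ∧
  (st.2.1 = 0 → st.2.2 = 0) ∧
  (∀ d, st.2.1 + d ≤ st.2.2 → cs[d]? = cs[st.2.1 + d]?)

-- the state after one of A's two "extend from scratch" updates satisfies InvA (i+1)
theorem invA_after_ext (cs : List Char) (i : Nat) (dp : List Nat)
    (h1 : 1 ≤ i) (hn : i < cs.length)
    (hlen : dp.length = cs.length) (h0 : dp.getD 0 0 = 0)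
    (hk : ∀ k, 1 ≤ k → k < i → dp.getD k 0 = lcpL cs (cs.drop k))
    (e : Nat) (he : e = i + lcpL cs (cs.drop i)) :
    InvA cs (i + 1) (dp.set i (e - 1 + 1 - i), i, e - 1) := by
  dsimp only [InvA]
  have hZle : lcpL cs (cs.drop i) ≤ cs.length - i := by
    have := lcpL_le cs (cs.drop i); simpa using this
  have hei : i ≤ e := by omega
  have hval : e - 1 + 1 - i = lcpL cs (cs.drop i) := by omega
  refine ⟨by simpa using hlen, ?_, ?_, by omega, by omega, by omega, ?_⟩
  · rw [List.getD_eq_getElem?_getD, List.getElem?_set_ne (by omega),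
      ← List.getD_eq_getElem?_getD]; exact h0
  · intro k hk1 hk2
    rcases Nat.lt_or_ge k i with h | h
    · rw [List.getD_eq_getElem?_getD, List.getElem?_set_ne (by omega),
        ← List.getD_eq_getElem?_getD]; exact hk k hk1 h
    · have : k = i := by omega
      subst this
      rw [List.getD_eq_getElem?_getD, List.getElem?_set_self (by omega)]
      simpa using hval
  · intro d hd
    have hdlt : d < lcpL cs (cs.drop i) := by omega
    have := lcpL_match cs (cs.drop i) d hdlt
    rwa [List.getElem?_drop] at this

theorem stepA_inv (cs : List Char) (i : Nat) (st : List Nat × Nat × Nat)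
    (h : InvA cs i st) (h1 : 1 ≤ i) (hn : i < cs.length) :
    InvA cs (i + 1) (stepA cs st i) := by
  obtain ⟨dp, left, right⟩ := st
  obtain ⟨hlen, h0, hk, hlt, hrn, hl0, hwin⟩ := h
  simp only at hlen h0 hk hlt hrn hl0 hwin
  rw [stepA]
  simp only
  by_cases hbr : right < i
  · rw [if_pos hbr]
    exact invA_after_ext cs i dp h1 hn hlen h0 hk _
      (extA_eq (cs.length - i) cs i i (by omega) (by omega) (by omega) (by omega))
  · rw [if_neg hbr]
    -- i ≤ right, so left ≥ 1 and val = i - left is a processed index ≥ 1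
    have hir : i ≤ right := by omega
    have hl1 : 1 ≤ left := by
      by_contra hc
      have : left = 0 := by omega
      have := hl0 this; omega
    have hvlo : 1 ≤ i - left := by omega
    have hvhi : i - left < i := by omega
    have hdpval : dp.getD (i - left) 0 = lcpL cs (cs.drop (i - left)) := hk _ hvlo hvhi
    set val := i - left with hvaldef
    set m := lcpL cs (cs.drop val) with hmdef
    have hil : left + val = i := by omega
    -- chain: prefix char k = char at val+k (lcp at val) = char at i+k (window)
    have hchain : ∀ k, k < m → i + k ≤ right → cs[k]? = cs[i + k]? := by
      intro k hkm hkr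
      have e1 : cs[k]? = cs[val + k]? := by
        have := lcpL_match cs (cs.drop val) k hkm
        rwa [List.getElem?_drop] at this
      have e2 : cs[val + k]? = cs[left + (val + k)]? :=
        hwin (val + k) (by omega)
      rw [e1, e2]
      congr 1
      omega
    by_cases hcp : dp.getD val 0 + i ≤ right
    · rw [if_pos hcp]
      rw [hdpval] at hcp
      -- copy case: Z i = Z val = m
      have hZi : lcpL cs (cs.drop i) = m := by
        refine lcpL_eq_of cs (cs.drop i) m (by simp; omega) ?_ ?_
        · intro k hk'
          rw [List.getElem?_drop]
          exact hchain k hk' (by omega)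
        · right
          rw [List.getElem?_drop]
          -- val + m < n (else i + m = left + n > right, contradiction)
          have hvm : val + m < cs.length := by
            have := lcpL_le cs (cs.drop val)
            simp only [List.length_drop] at this
            rw [← hmdef] at this
            omega
          have hstop := lcpL_stop cs (cs.drop val) (by simp; omega)
          rw [List.getElem?_drop, ← hmdef] at hstop
          have e2 : cs[val + m]? = cs[i + m]? := by
            have := hwin (val + m) (by omega)
            rw [this]
            congr 1
            omega
          rw [← e2]
          exact hstop
      dsimp only [InvA]
      refine ⟨by simpa using hlen, ?_, ?_, by omega, by omega, by omega, hwin⟩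
      · rw [List.getD_eq_getElem?_getD, List.getElem?_set_ne (by omega),
          ← List.getD_eq_getElem?_getD]; exact h0
      · intro k hk1 hk2
        rcases Nat.lt_or_ge k i with hki | hki
        · rw [List.getD_eq_getElem?_getD, List.getElem?_set_ne (by omega),
            ← List.getD_eq_getElem?_getD]; exact hk k hk1 hki
        · have : k = i := by omega
          subst this
          rw [List.getD_eq_getElem?_getD, List.getElem?_set_self (by omega)]
          simp only [Option.getD_some]
          rw [hdpval, hZi]
    · rw [if_neg hcp]
      rw [hdpval] at hcp
      -- restart case: everything in i..right-1 already matches the prefix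
      refine invA_after_ext cs i dp h1 hn hlen h0 hk _
        (extA_eq (cs.length - right) cs i right (by omega) (by omega) (by omega) ?_)
      intro k hkr
      exact hchain k (by omega) (by omega)

theorem fold_inv (cs : List Char) : ∀ (cnt start : Nat) (st : List Nat × Nat × Nat),
    1 ≤ start → start + cnt ≤ cs.length → InvA cs start st →
    InvA cs (start + cnt) ((List.range' start cnt).foldl (stepA cs) st) := by
  intro cnt
  induction cnt with
  | zero => intro start st _ _ h; simpa using h
  | succ cnt ih =>
    intro start st hs hcnt h
    rw [List.range'_succ, List.foldl_cons]
    have := ih (start + 1) (stepA cs st start)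
      (by omega) (by omega) (stepA_inv cs start st h hs (by omega))
    rw [show start + (cnt + 1) = start + 1 + cnt by omega]
    exact this

-- a list is the map of getD over its index range (to turn dp.sum pointwise)
theorem sum_eq_sum_getD (l : List Nat) :
    l.sum = ((List.range l.length).map (fun k => l.getD k 0)).sum := by
  congr 1
  refine List.ext_getElem (by simp) ?_
  intro i h1 h2
  simp only [List.getElem_map, List.getElem_range]
  rw [List.getD_eq_getElem l 0 (by simpa using h1)]

theorem sumScores_spec : Claim_equal_sumScores := by
  intro s _
  unfold Spec_sumScores sumScores sumScores_alt
  simp only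
  set cs := s.toList with hcs
  set n := cs.length with hn
  rw [PySem.List.foldl_add_nat]
  rcases Nat.eq_zero_or_pos n with h0 | hpos
  · simp [h0]
  · have hinv : InvA cs 1 ((List.replicate n 0 : List Nat), 0, 0) := by
      dsimp only [InvA]
      refine ⟨by simp [hn], ?_, ?_, by omega, by omega, by simp, ?_⟩
      · simp [List.getD_eq_getElem?_getD, hpos]
      · intro k hk1 hk2; omega
      · intro d hd
        have : d = 0 := by omega
        simp [this]
    have hfold := fold_inv cs (n - 1) 1 ((List.replicate n 0 : List Nat), 0, 0) (by omega) (by omega) hinv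
    rw [show 1 + (n - 1) = n by omega] at hfold
    obtain ⟨hlen, h0, hk, -, -, -, -⟩ := hfold
    -- A's dp sum: pointwise values
    set res := (List.range' 1 (n - 1)).foldl (stepA cs) ((List.replicate n 0 : List Nat), 0, 0) with hres
    have hsum : res.1.sum = ((List.range n).map (fun k => res.1.getD k 0)).sum := by
      rw [sum_eq_sum_getD, hlen, ← hn]
    -- peel off index 0 from both sums
    obtain ⟨m, hm⟩ : ∃ m, n = m + 1 := ⟨n - 1, by omega⟩
    have hrange : List.range n = 0 :: List.range' 1 m := by
      rw [List.range_eq_range', hm, List.range'_succ]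
    have hmapA : (List.range' 1 m).map (fun k => res.1.getD k 0)
        = (List.range' 1 m).map (fun k => scanB cs k 0) := by
      refine List.map_congr_left ?_
      intro k hkmem
      have hkb : 1 ≤ k ∧ k < 1 + m := by
        have := List.mem_range'_1.mp hkmem; exact this
      rw [hk k hkb.1 (by omega)]
      rw [scanB_eq (n - k) cs k 0 (by omega) (by omega) (by omega)]
    have hB0 : scanB cs 0 0 = n := by
      rw [scanB_eq n cs 0 0 (by omega) (by omega) (by omega)]
      simpa using lcpL_refl cs
    have : res.1.sum + n = ((List.range n).map (fun k => scanB cs k 0)).sum := by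
      rw [hsum, hrange]
      simp only [List.map_cons, List.sum_cons, hmapA, hB0, h0]
      omega
    omega
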